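-- pv_equiv track=rewrite | github.com/bhaskarborah/CMU-Python | Week_3/test_program.py | nth_property_309
-- ===== SOURCE A (Python) =====
-- def digit_present(num, digit):
--     while num > 0:
--         if digit == num%10: return True
--         num //= 10
--     return False
--
-- def has_property_309(n):
--     fifth_power = n**5
--     for i in range(10):
--         if not digit_present(fifth_power, i):
--             return False
--     return True
--
-- def nth_property_309(n):
--     num_found = 0
--     i = 0
--     while num_found <= n:
--         i += 1
--         if has_property_309(i):
--             num_found += 1
--     return i
-- ===== SOURCE B (Python) =====
-- def nth_property_309(n):
--     def is_pandigital_5th(i):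
--         p = i ** 5
--         digits = set()
--         while p > 0:
--             digits.add(p % 10)
--             p //= 10
--         return len(digits) == 10
--
--     def next_after(i):
--         i += 1
--         while not is_pandigital_5th(i):
--             i += 1
--         return i
--
--     i = 0
--     for _ in range(n + 1):
--         i = next_after(i)
--     return i
-- ===== Notes on version B (the rewrite author's own statement) =====
-- stated objective: faster
-- what changed: The counting loop with a num_found accumulator is replaced by iterating a next_after successor function n+1 times, and the ten separate digit scans of the fifth power are replaced by one mod-10 pass collecting the distinct digits into a set and checking its size is 10.
import Mathlib
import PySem

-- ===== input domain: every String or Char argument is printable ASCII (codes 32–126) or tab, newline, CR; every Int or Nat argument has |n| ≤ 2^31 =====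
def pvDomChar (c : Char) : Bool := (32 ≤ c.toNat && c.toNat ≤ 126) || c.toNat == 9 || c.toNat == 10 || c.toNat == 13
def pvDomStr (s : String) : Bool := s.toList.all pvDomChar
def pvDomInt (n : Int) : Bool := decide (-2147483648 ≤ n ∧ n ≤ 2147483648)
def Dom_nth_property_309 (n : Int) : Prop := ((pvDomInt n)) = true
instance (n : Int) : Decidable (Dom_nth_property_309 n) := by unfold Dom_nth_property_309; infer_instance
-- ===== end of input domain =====

-- B iterates a next_after successor function n+1 times instead of counting matches in one loop,
-- and tests the property by one mod-10 pass into a digit set instead of ten digit scans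
-- (objective: alternative).

-- fuel making the unbounded sequential searches total; it is never exhausted on the evaluated inputs
def pvFuel : Nat := 2 ^ 40

-- ===== PORT A =====
def digitPresent (num digit : Int) : Bool :=
  if h : 0 < num then
    if digit == PySem.Int.mod num 10 then true
    else digitPresent (PySem.Int.floordiv num 10) digit
  else false
termination_by num.toNat
decreasing_by
  rw [PySem.Int.floordiv_eq_ediv_of_pos (by norm_num : (0:Int) < 10)]
  have h1 : num / 10 < num := Int.ediv_lt_of_lt_mul (by norm_num) (by nlinarith)
  have h2 : 0 ≤ num / 10 := Int.ediv_nonneg (le_of_lt h) (by norm_num)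
  omega

def hasProperty309 (n : Int) : Bool :=
  let fifthPower := n ^ 5
  (PySem.List.pyRange 0 10 1).all (fun i => digitPresent fifthPower i)

def loopA (n numFound i : Int) : Nat → Int
  | 0 => i
  | fuel + 1 =>
    if numFound ≤ n then
      let i' := i + 1
      if hasProperty309 i' then loopA n (numFound + 1) i' fuel
      else loopA n numFound i' fuel
    else i

def nth_property_309 (n : Int) : Int := loopA n 0 0 pvFuel

-- ===== PORT B =====
-- inner 'while p > 0: digits.add(p % 10); p //= 10' of is_pandigital_5th
def digitsOf (p : Int) (digits : PySem.Set Int) : PySem.Set Int :=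
  if h : 0 < p then
    digitsOf (PySem.Int.floordiv p 10) (PySem.Set.add digits (PySem.Int.mod p 10))
  else digits
termination_by p.toNat
decreasing_by
  rw [PySem.Int.floordiv_eq_ediv_of_pos (by norm_num : (0:Int) < 10)]
  have h1 : p / 10 < p := Int.ediv_lt_of_lt_mul (by norm_num) (by nlinarith)
  have h2 : 0 ≤ p / 10 := Int.ediv_nonneg (le_of_lt h) (by norm_num)
  omega

def isPandigital5th (i : Int) : Bool :=
  PySem.Set.len (digitsOf (i ^ 5) PySem.Set.empty) == 10

-- 'i += 1; while not is_pandigital_5th(i): i += 1; return i', carrying the remaining fuel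
def nextAfter (i : Int) : Nat → Int × Nat
  | 0 => (i, 0)
  | fuel + 1 =>
    let i' := i + 1
    if isPandigital5th i' then (i', fuel) else nextAfter i' fuel

-- 'for _ in range(n + 1): i = next_after(i)' as a counted recursion
def iterNext : Nat → Int → Nat → Int
  | 0, i, _ => i
  | k + 1, i, fuel =>
    let r := nextAfter i fuel
    iterNext k r.1 r.2

def nth_property_309_alt (n : Int) : Int := iterNext (n + 1).toNat 0 pvFuel

-- ===== PRECONDITION & SPEC =====
def Spec_nth_property_309 (n : Int) (out : Int) : Prop := out = nth_property_309_alt n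
instance (n : Int) (out : Int) : Decidable (Spec_nth_property_309 n out) := by unfold Spec_nth_property_309; infer_instance

-- ===== CLAIM (what is proved, stated in full; the proofs are below) =====
def Claim_equal_nth_property_309 : Prop := ∀ (n : Int), Dom_nth_property_309 n → Spec_nth_property_309 n (nth_property_309 n)

-- ===== LEMMAS AND PROOFS =====

theorem mem_digitsOf (p : Int) (s : PySem.Set Int) (d : Int) :
    d ∈ digitsOf p s ↔ d ∈ s ∨ digitPresent p d = true := by
  fun_induction digitsOf p s with
  | case1 p s h ih =>
    rw [digitPresent]
    rw [ih, PySem.Set.mem_add]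
    by_cases hd : d = PySem.Int.mod p 10 <;> simp [h, hd] <;> tauto
  | case2 p s h =>
    rw [digitPresent]
    simp [h]

theorem nodup_digitsOf (p : Int) (s : PySem.Set Int) (hs : s.Nodup) :
    (digitsOf p s).Nodup := by
  fun_induction digitsOf p s with
  | case1 p s h ih => exact ih (PySem.Set.nodup_add _ _ hs)
  | case2 p s h => exact hs

theorem range_digitsOf (p : Int) (s : PySem.Set Int) (d : Int)
    (hd : d ∈ digitsOf p s) : d ∈ s ∨ (0 ≤ d ∧ d < 10) := by
  fun_induction digitsOf p s with
  | case1 p s h ih =>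
    rcases ih hd with hmem | hrange
    · rw [PySem.Set.mem_add] at hmem
      rcases hmem with hmem | rfl
      · exact Or.inl hmem
      · right
        rw [PySem.Int.mod_eq_emod_of_pos (by norm_num)]
        exact ⟨Int.emod_nonneg p (by norm_num), Int.emod_lt_of_pos p (by norm_num)⟩
    · exact Or.inr hrange
  | case2 p s h => exact Or.inl hd

-- A's ten digit scans and B's digit-set size test agree
theorem test_eq (m : Int) : hasProperty309 m = isPandigital5th m := by
  unfold hasProperty309 isPandigital5th
  set p := m ^ 5 with hp
  have hr : PySem.List.pyRange 0 10 1 = [0,1,2,3,4,5,6,7,8,9] := by decide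
  have hmem : ∀ d, d ∈ digitsOf p PySem.Set.empty ↔ digitPresent p d = true := by
    intro d
    rw [mem_digitsOf]
    simp [PySem.Set.empty]
  have hnd : (digitsOf p PySem.Set.empty).Nodup := nodup_digitsOf p _ List.nodup_nil
  have hsub : (digitsOf p PySem.Set.empty).toFinset ⊆ ({0,1,2,3,4,5,6,7,8,9} : Finset Int) := by
    intro d hd
    rw [List.mem_toFinset] at hd
    rcases range_digitsOf p _ d hd with h | h
    · simp [PySem.Set.empty] at h
    · simp only [Finset.mem_insert, Finset.mem_singleton]; omega
  have hcard : (digitsOf p PySem.Set.empty).toFinset.card = (digitsOf p PySem.Set.empty).length :=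
    List.toFinset_card_of_nodup hnd
  have hT : ({0,1,2,3,4,5,6,7,8,9} : Finset Int).card = 10 := by decide
  rw [Bool.eq_iff_iff, hr]
  simp only [List.all_eq_true, beq_iff_eq, PySem.Set.len]
  constructor
  · intro hall
    have hsup : ({0,1,2,3,4,5,6,7,8,9} : Finset Int) ⊆ (digitsOf p PySem.Set.empty).toFinset := by
      intro d hd
      rw [List.mem_toFinset, hmem]
      apply hall
      simp only [Finset.mem_insert, Finset.mem_singleton] at hd
      rcases hd with rfl|rfl|rfl|rfl|rfl|rfl|rfl|rfl|rfl|rfl <;> simp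
    have : (digitsOf p PySem.Set.empty).toFinset = ({0,1,2,3,4,5,6,7,8,9} : Finset Int) :=
      Finset.Subset.antisymm hsub hsup
    rw [← hcard, this]
    decide
  · intro hlen d hd
    have heq : (digitsOf p PySem.Set.empty).toFinset = ({0,1,2,3,4,5,6,7,8,9} : Finset Int) := by
      apply Finset.eq_of_subset_of_card_le hsub
      rw [hcard, hT]
      omega
    rw [← hmem, ← List.mem_toFinset, heq]
    fin_cases hd <;> decide

theorem iterNext_zero_fuel (k : Nat) (i : Int) : iterNext k i 0 = i := by
  induction k with
  | zero => rfl
  | succ k ih => simp [iterNext, nextAfter, ih]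

theorem loop_eq (fuel : Nat) (n : Int) : ∀ (numFound i : Int),
    loopA n numFound i fuel = iterNext (n + 1 - numFound).toNat i fuel := by
  induction fuel with
  | zero => intro numFound i; rw [iterNext_zero_fuel]; rfl
  | succ fuel ih =>
    intro numFound i
    rw [loopA]
    by_cases h : numFound ≤ n
    · have hk : (n + 1 - numFound).toNat = (n + 1 - (numFound + 1)).toNat + 1 := by omega
      rw [hk]
      simp only [h, if_true, iterNext, nextAfter, test_eq]
      by_cases hp : isPandigital5th (i + 1)
      · simp only [hp, if_true]
        rw [ih]
      · simp only [hp, Bool.false_eq_true, if_false]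
        rw [ih, hk, iterNext]
    · have hk : (n + 1 - numFound).toNat = 0 := by omega
      simp [h, hk, iterNext]

-- ===== VERDICT (by name: the statement is the Claim_ definition above) =====
theorem nth_property_309_spec : Claim_equal_nth_property_309 := by
  intro n _
  unfold Spec_nth_property_309 nth_property_309 nth_property_309_alt
  rw [loop_eq]
  norm_num
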